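-- pv_equiv track=rewrite | github.com/cwlkr1995/osint-abay | bot.py | _match_weights
-- ===== SOURCE A (Python) =====
-- def _match_weights(title: str, weights: dict[str, int]) -> tuple[int, list[str]]:
--     score = 0
--     triggers: list[str] = []
--     t = title.lower()
--     for k, w in weights.items():
--         if k in t:
--             score += w
--             triggers.append(k)
--     return score, triggers
-- ===== SOURCE B (Python) =====
-- def _match_weights(title: str, weights: dict[str, int]) -> tuple[int, list[str]]:
--     t = title.lower()
--     n = len(t)
--     # index built once: every window of t whose length is an actual key length
--     subs = set()
--     for L in {len(k) for k in weights}: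
--         for i in range(n - L + 1):
--             subs.add(t[i:i + L])
--     hits = [(k, w) for k, w in weights.items() if k in subs]
--     return sum(w for _, w in hits), [k for k, _ in hits]
-- ===== Notes on version B (the rewrite author's own statement) =====
-- stated objective: faster
-- what changed: B builds, once, the set of all title windows whose length is a distinct key length, then replaces A's per-key substring scan of the title by a set lookup and assembles score and triggers from one filtered list instead of an accumulator loop.
import Mathlib
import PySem

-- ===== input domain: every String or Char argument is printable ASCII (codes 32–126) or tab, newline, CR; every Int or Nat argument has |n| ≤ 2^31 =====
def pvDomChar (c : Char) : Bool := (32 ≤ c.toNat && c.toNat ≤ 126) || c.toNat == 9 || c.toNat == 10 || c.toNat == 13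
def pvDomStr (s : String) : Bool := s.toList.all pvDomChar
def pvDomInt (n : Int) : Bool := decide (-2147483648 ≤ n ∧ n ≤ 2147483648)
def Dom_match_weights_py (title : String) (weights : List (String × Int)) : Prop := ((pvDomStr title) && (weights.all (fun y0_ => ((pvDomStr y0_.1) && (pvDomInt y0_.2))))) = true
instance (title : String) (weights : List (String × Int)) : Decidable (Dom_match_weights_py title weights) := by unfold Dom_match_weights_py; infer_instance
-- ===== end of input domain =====

-- B changes the algorithm: a window index of the title (one set per distinct key length, built once) replaces A's per-key substring scan (objective: alternative).

-- ===== PORT A =====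
-- loop over weights.items() accumulating (score, triggers); 'k in t' is PySem.Str.isIn
def match_weights_py (title : String) (weights : List (String × Int)) : Int × List String :=
  let t := PySem.Str.lower title
  weights.foldl
    (fun acc kw => if PySem.Str.isIn kw.1 t then (acc.1 + kw.2, acc.2 ++ [kw.1]) else acc)
    ((0 : Int), ([] : List String))

-- ===== PORT B =====
-- [t[i:i+L] for i in range(n - L + 1)]; strings handled as List Char (exact on code points)
def pvWindows (t : List Char) (L : Int) : List (List Char) :=
  (PySem.List.pyRange 0 ((t.length : Int) - L + 1) 1).map
    (fun i => PySem.List.slice t (some i) (some (i + L)))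

def match_weights_py_alt (title : String) (weights : List (String × Int)) : Int × List String :=
  let t := (PySem.Str.lower title).toList
  let lens : PySem.Set Int := PySem.Set.ofList (weights.map (fun kw => (kw.1.toList.length : Int)))
  -- subs is consumed only by membership tests, so Python's set-iteration order over lens is immaterial
  let subs : PySem.Set (List Char) :=
    lens.foldl (fun s L => PySem.Set.update s (pvWindows t L)) PySem.Set.empty
  let hits := weights.filter (fun kw => PySem.Set.contains subs kw.1.toList)
  ((hits.map (·.2)).sum, hits.map (·.1))

-- ===== PRECONDITION & SPEC =====
def Spec_match_weights_py (title : String) (weights : List (String × Int)) (out : Int × List String) : Prop := out = match_weights_py_alt title weights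
instance (title : String) (weights : List (String × Int)) (out : Int × List String) : Decidable (Spec_match_weights_py title weights out) := by unfold Spec_match_weights_py; infer_instance

-- ===== CLAIM (what is proved, stated in full; the proofs are below) =====
def Claim_equal_match_weights_py : Prop := ∀ (title : String) (weights : List (String × Int)), Dom_match_weights_py title weights → Spec_match_weights_py title weights (match_weights_py title weights)

-- ===== LEMMAS AND PROOFS =====

lemma mem_pvWindows (t l : List Char) (L : Int) (hL : 0 ≤ L) :
    l ∈ pvWindows t L ↔ l <:+: t ∧ (l.length : Int) = L := by
  simp only [pvWindows, List.mem_map, PySem.List.mem_pyRange_one]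
  constructor
  · rintro ⟨i, ⟨hi0, hi1⟩, rfl⟩
    rw [PySem.List.slice_toNat t hi0 (by omega)]
    refine ⟨(List.take_prefix _ _).isInfix.trans (List.drop_suffix _ _).isInfix, ?_⟩
    simp
    omega
  · rintro ⟨⟨s, u, rfl⟩, hlen⟩
    refine ⟨(s.length : Int), ⟨Int.natCast_nonneg _, by simp; omega⟩, ?_⟩
    have : (s.length : Int) + L = ((s.length + l.length : Nat) : Int) := by push_cast; omega
    rw [this, PySem.List.slice_natCast]
    simp

lemma mem_foldl_update (t : List Char) :
    ∀ (Ls : List Int) (s : PySem.Set (List Char)) (y : List Char),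
      y ∈ Ls.foldl (fun s L => PySem.Set.update s (pvWindows t L)) s
        ↔ y ∈ s ∨ ∃ L ∈ Ls, y ∈ pvWindows t L := by
  intro Ls
  induction Ls with
  | nil => intro s y; simp
  | cons L Ls ih =>
    intro s y
    simp only [List.foldl_cons, ih, PySem.Set.mem_update, List.mem_cons]
    constructor
    · rintro (⟨h | h⟩ | ⟨L', hL', h⟩)
      · exact Or.inl h
      · exact Or.inr ⟨L, Or.inl rfl, h⟩
      · exact Or.inr ⟨L', Or.inr hL', h⟩
    · rintro (h | ⟨L', (rfl | hL'), h⟩)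
      · exact Or.inl (Or.inl h)
      · exact Or.inl (Or.inr h)
      · exact Or.inr ⟨L', hL', h⟩

lemma pv_fold_filter (p : String × Int → Bool) :
    ∀ (ws : List (String × Int)) (s : Int) (tr : List String),
      ws.foldl (fun acc kw => if p kw then (acc.1 + kw.2, acc.2 ++ [kw.1]) else acc) (s, tr)
        = (s + ((ws.filter p).map (·.2)).sum, tr ++ (ws.filter p).map (·.1)) := by
  intro ws
  induction ws with
  | nil => intro s tr; simp
  | cons kw ws ih =>
    intro s tr
    by_cases h : p kw = true
    · simp [h, ih, add_assoc]
    · simp [h, ih]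

-- ===== VERDICT (by name: the statement is the Claim_ definition above) =====
theorem match_weights_py_spec : Claim_equal_match_weights_py := by
  intro title weights _
  show _ = _
  unfold match_weights_py match_weights_py_alt
  rw [pv_fold_filter]
  have hp : ∀ kw ∈ weights,
      PySem.Str.isIn kw.1 (PySem.Str.lower title)
        = PySem.Set.contains
            ((PySem.Set.ofList (weights.map (fun kw => (kw.1.toList.length : Int)))).foldl
              (fun s L => PySem.Set.update s (pvWindows (PySem.Str.lower title).toList L))
              PySem.Set.empty)
            kw.1.toList := by
    intro kw hkw
    have hmem : (kw.1.toList.length : Int)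
        ∈ PySem.Set.ofList (weights.map (fun kw => (kw.1.toList.length : Int))) := by
      rw [PySem.Set.mem_ofList]
      exact List.mem_map.mpr ⟨kw, hkw, rfl⟩
    rw [Bool.eq_iff_iff, PySem.Str.isIn_iff_infix, PySem.Set.contains_iff,
      mem_foldl_update]
    constructor
    · intro h
      exact Or.inr ⟨_, hmem, (mem_pvWindows _ _ _ (Int.natCast_nonneg _)).mpr ⟨h, rfl⟩⟩
    · rintro (h | ⟨L, hL, h⟩)
      · simp [PySem.Set.empty] at h
      · have hL0 : 0 ≤ L := by
          rw [PySem.Set.mem_ofList, List.mem_map] at hL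
          obtain ⟨kw', _, rfl⟩ := hL
          exact Int.natCast_nonneg _
        exact ((mem_pvWindows _ _ _ hL0).mp h).1
  rw [List.filter_congr hp]
  simp
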